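-- pv_equiv track=rewrite | github.com/PEFrankel/OpenFF-Bilayer | Simulations/CHARMM36/unique_angle_dihedral_ID.py | match_angle_to_angle_type
-- ===== SOURCE A (Python) =====
-- def match_angle_to_angle_type(angle_atoms, atom_types, angletypes):
--     """
--        Match an angle to its angle type. The logic in this function only accounts
--        for topologies with consistent naming (i.e. if an angle is specified as ijk,
--        jik will be recognized as a unique angle)
--     """
--     a1, a2, a3 = [atom_types[a] for a in angle_atoms]
--
--     # Find exact match
--     for (i, j, k), func, params in angletypes:
--         if (i == a1 and j == a2 and k == a3) or \
--            (i == a3 and j == a2 and k == a1):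
--             return ((i, j, k), func, params)
--
--     # Find match with wildcards (X)
--     for (i, j, k), func, params in angletypes:
--         if j == a2:
--             if (i == a1 or i == "X") and (k == a3 or k == "X"):
--                 return ((i, j, k), func, params)
--             if (i == a3 or i == "X") and (k == a1 or k == "X"):
--                 return ((i, j, k), func, params)
--
--     # If no match found
--     return None
-- ===== SOURCE B (Python) =====
-- def match_angle_to_angle_type(angle_atoms, atom_types, angletypes):
--     a1, a2, a3 = (atom_types[a] for a in angle_atoms)
--
--     def rank(entry):
--         (i, j, k), _func, _params = entry
--         if (i, j, k) == (a1, a2, a3) or (i, j, k) == (a3, a2, a1):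
--             return 0
--         if j == a2 and ((i in (a1, "X") and k in (a3, "X")) or (i in (a3, "X") and k in (a1, "X"))):
--             return 1
--         return 2
--
--     candidates = [e for e in angletypes if rank(e) < 2]
--     return min(candidates, key=rank) if candidates else None
-- ===== Notes on version B (the rewrite author's own statement) =====
-- stated objective: alternative
-- what changed: Replaces A's two prioritized scans with a score-and-select formulation: each entry gets a rank (0 exact, 1 wildcard, 2 no match), non-matches are filtered out, and min with key=rank (first minimum) picks the result.
import Mathlib
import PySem

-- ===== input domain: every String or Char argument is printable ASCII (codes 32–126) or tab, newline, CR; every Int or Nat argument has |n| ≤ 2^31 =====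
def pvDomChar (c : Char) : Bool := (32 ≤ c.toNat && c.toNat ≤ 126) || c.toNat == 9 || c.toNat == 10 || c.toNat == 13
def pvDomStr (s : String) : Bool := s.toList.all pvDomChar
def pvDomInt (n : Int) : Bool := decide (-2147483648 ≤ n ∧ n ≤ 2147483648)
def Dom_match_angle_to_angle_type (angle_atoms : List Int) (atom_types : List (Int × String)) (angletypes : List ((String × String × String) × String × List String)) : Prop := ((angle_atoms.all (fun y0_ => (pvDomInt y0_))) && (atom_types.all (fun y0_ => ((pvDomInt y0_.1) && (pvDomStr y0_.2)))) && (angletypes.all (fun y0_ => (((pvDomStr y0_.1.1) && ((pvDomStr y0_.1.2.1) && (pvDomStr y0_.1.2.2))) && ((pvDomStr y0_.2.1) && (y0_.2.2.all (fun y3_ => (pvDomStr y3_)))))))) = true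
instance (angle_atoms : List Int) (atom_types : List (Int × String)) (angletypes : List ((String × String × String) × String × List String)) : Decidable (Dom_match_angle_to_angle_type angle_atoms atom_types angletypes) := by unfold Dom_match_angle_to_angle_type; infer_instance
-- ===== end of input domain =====

-- B replaces A's two prioritized scans with score-and-select: rank each entry
-- (0 exact, 1 wildcard, 2 no match), filter out rank 2, take min by rank (first minimum).
-- ===== PORT A =====
-- dict lookup atom_types[a] (first match on the association list); none = KeyError
def pvLookup (atom_types : List (Int × String)) (a : Int) : Option String :=
  (atom_types.find? (fun p => p.1 == a)).map (·.2)

def pvExact (a1 a2 a3 : String) (e : (String × String × String) × String × List String) : Bool :=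
  (e.1.1 == a1 && e.1.2.1 == a2 && e.1.2.2 == a3) || (e.1.1 == a3 && e.1.2.1 == a2 && e.1.2.2 == a1)

def pvWild (a1 a2 a3 : String) (e : (String × String × String) × String × List String) : Bool :=
  e.1.2.1 == a2 &&
    (((e.1.1 == a1 || e.1.1 == "X") && (e.1.2.2 == a3 || e.1.2.2 == "X")) ||
     ((e.1.1 == a3 || e.1.1 == "X") && (e.1.2.2 == a1 || e.1.2.2 == "X")))

-- A's first loop: find exact match
def pvExactScan (a1 a2 a3 : String) : List ((String × String × String) × String × List String) → Option ((String × String × String) × String × List String)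
  | [] => none
  | e :: rest => if pvExact a1 a2 a3 e then some e else pvExactScan a1 a2 a3 rest

-- A's second loop: find wildcard match
def pvWildScan (a1 a2 a3 : String) : List ((String × String × String) × String × List String) → Option ((String × String × String) × String × List String)
  | [] => none
  | e :: rest => if pvWild a1 a2 a3 e then some e else pvWildScan a1 a2 a3 rest

def match_angle_to_angle_type (angle_atoms : List Int) (atom_types : List (Int × String)) (angletypes : List ((String × String × String) × String × List String)) : Option ((String × String × String) × String × List String) :=
  match angle_atoms.map (pvLookup atom_types) with
  | [some a1, some a2, some a3] =>
      match pvExactScan a1 a2 a3 angletypes with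
      | some e => some e
      | none => pvWildScan a1 a2 a3 angletypes
  | _ => none  -- unreachable under Pre_ (ValueError/KeyError in Python)

-- ===== PORT B =====
-- B's rank of an entry: 0 = exact (either orientation), 1 = wildcard match, 2 = no match
def pvRankB (a1 a2 a3 : String) (e : (String × String × String) × String × List String) : Nat :=
  match e with
  | ((i, j, k), _, _) =>
    if (i, j, k) == (a1, a2, a3) || (i, j, k) == (a3, a2, a1) then 0
    else if j == a2 && (([a1, "X"].contains i && [a3, "X"].contains k) ||
                        ([a3, "X"].contains i && [a1, "X"].contains k)) then 1
    else 2

def match_angle_to_angle_type_alt (angle_atoms : List Int) (atom_types : List (Int × String)) (angletypes : List ((String × String × String) × String × List String)) : Option ((String × String × String) × String × List String) :=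
  -- unpack the three atom names; any failure here is a Python exception, excluded by Pre_
  if angle_atoms.length == 3 then
    (angle_atoms[0]?.bind (List.lookup · atom_types)).bind fun a1 =>
    (angle_atoms[1]?.bind (List.lookup · atom_types)).bind fun a2 =>
    (angle_atoms[2]?.bind (List.lookup · atom_types)).bind fun a3 =>
    -- candidates = entries of rank < 2; min with key=rank returns the FIRST minimum,
    -- and is none exactly when candidates is empty (Python's `else None`)
    PySem.List.min? (angletypes.filter (fun e => pvRankB a1 a2 a3 e < 2)) (pvRankB a1 a2 a3)
  else none

-- ===== PRECONDITION & SPEC =====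
-- A raises unless angle_atoms has exactly 3 elements (unpacking) all present as keys of atom_types
def Pre_match_angle_to_angle_type (angle_atoms : List Int) (atom_types : List (Int × String)) (angletypes : List ((String × String × String) × String × List String)) : Prop :=
  angle_atoms.length = 3 ∧ ∀ a ∈ angle_atoms, ∃ p ∈ atom_types, p.1 = a
instance (angle_atoms : List Int) (atom_types : List (Int × String)) (angletypes : List ((String × String × String) × String × List String)) : Decidable (Pre_match_angle_to_angle_type angle_atoms atom_types angletypes) := by unfold Pre_match_angle_to_angle_type; infer_instance
def pvWitness_match_angle_to_angle_type : List Int × (List (Int × String)) × (List ((String × String × String) × String × List String)) :=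
  ([0, 1, 2], [(0, "A"), (1, "B"), (2, "C")], [(("A", "B", "C"), "1", ["300.0"])])
def Spec_match_angle_to_angle_type (angle_atoms : List Int) (atom_types : List (Int × String)) (angletypes : List ((String × String × String) × String × List String)) (out : Option ((String × String × String) × String × List String)) : Prop := out = match_angle_to_angle_type_alt angle_atoms atom_types angletypes
instance (angle_atoms : List Int) (atom_types : List (Int × String)) (angletypes : List ((String × String × String) × String × List String)) (out : Option ((String × String × String) × String × List String)) : Decidable (Spec_match_angle_to_angle_type angle_atoms atom_types angletypes out) := by unfold Spec_match_angle_to_angle_type; infer_instance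

-- ===== CLAIM (what is proved, stated in full; the proofs are below) =====
def Claim_equal_match_angle_to_angle_type : Prop := ∀ (angle_atoms : List Int) (atom_types : List (Int × String)) (angletypes : List ((String × String × String) × String × List String)), Dom_match_angle_to_angle_type angle_atoms atom_types angletypes → Pre_match_angle_to_angle_type angle_atoms atom_types angletypes → Spec_match_angle_to_angle_type angle_atoms atom_types angletypes (match_angle_to_angle_type angle_atoms atom_types angletypes)

-- ===== LEMMAS AND PROOFS =====
-- bridge: B's rank in terms of A's two predicates
theorem rankB_eq (a1 a2 a3 : String) (e : (String × String × String) × String × List String) :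
    pvRankB a1 a2 a3 e = if pvExact a1 a2 a3 e then 0 else if pvWild a1 a2 a3 e then 1 else 2 := by
  rcases e with ⟨⟨i, j, k⟩, f, p⟩
  simp only [pvRankB, pvExact, pvWild, List.contains_cons, List.contains_nil, Bool.or_false]
  by_cases h1 : i = a1 <;> by_cases h2 : j = a2 <;> by_cases h3 : k = a3 <;>
    by_cases h4 : i = a3 <;> by_cases h5 : k = a1 <;>
    by_cases h6 : i = "X" <;> by_cases h7 : k = "X" <;>
    simp_all [Prod.ext_iff, beq_iff_eq]

-- B's lookup equals A's
theorem lookup_eq_find (atom_types : List (Int × String)) (a : Int) :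
    List.lookup a atom_types = pvLookup atom_types a := by
  induction atom_types with
  | nil => rfl
  | cons p t ih =>
    rcases p with ⟨k, v⟩
    by_cases h : k = a
    · simp [List.lookup, pvLookup, List.find?, h]
    · have hb1 : (a == k) = false := beq_eq_false_iff_ne.mpr (Ne.symm h)
      have hb2 : (k == a) = false := beq_eq_false_iff_ne.mpr h
      simp only [List.lookup, hb1]
      rw [ih]
      simp [pvLookup, hb2]

-- min?'s folding step, named so the lemmas below can speak about partial folds
def pvStep (a1 a2 a3 : String) (acc : Option ((String × String × String) × String × List String)) (x : (String × String × String) × String × List String) : Option ((String × String × String) × String × List String) :=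
  match acc with
  | none => some x
  | some m => if pvRankB a1 a2 a3 x < pvRankB a1 a2 a3 m then some x else some m

theorem min?_eq_foldl_step (a1 a2 a3 : String) (xs : List ((String × String × String) × String × List String)) :
    PySem.List.min? xs (pvRankB a1 a2 a3) = xs.foldl (pvStep a1 a2 a3) none := by
  unfold PySem.List.min?
  congr 1
  funext acc x
  cases acc <;> rfl

-- an accumulator of rank 0 is never replaced
theorem minStep_fixed (a1 a2 a3 : String) (m : (String × String × String) × String × List String)
    (hm : pvRankB a1 a2 a3 m = 0) (t : List ((String × String × String) × String × List String)) :
    t.foldl (pvStep a1 a2 a3) (some m) = some m := by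
  induction t with
  | nil => rfl
  | cons x t ih => simp [pvStep, hm, ih]

-- an accumulator of rank 1 is replaced exactly by the first exact entry
theorem minStep_wild (a1 a2 a3 : String) (m : (String × String × String) × String × List String)
    (hm : pvRankB a1 a2 a3 m = 1) (l : List ((String × String × String) × String × List String)) :
    (l.filter (fun e => pvRankB a1 a2 a3 e < 2)).foldl (pvStep a1 a2 a3) (some m) =
      match pvExactScan a1 a2 a3 l with
      | some e => some e
      | none => some m := by
  induction l with
  | nil => rfl
  | cons x l ih =>
    have hr := rankB_eq a1 a2 a3 x
    by_cases hx : pvExact a1 a2 a3 x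
    · have hx0 : pvRankB a1 a2 a3 x = 0 := by rw [hr]; simp [hx]
      simp only [List.filter_cons, hx0, show decide ((0:Nat) < 2) = true from rfl, if_true,
        List.foldl_cons, pvStep, hm, show (if (0:Nat) < 1 then some x else some m) = some x from rfl,
        pvExactScan, hx]
      exact minStep_fixed a1 a2 a3 x hx0 _
    · by_cases hw : pvWild a1 a2 a3 x
      · have hx1 : pvRankB a1 a2 a3 x = 1 := by rw [hr]; simp [hx, hw]
        simp only [List.filter_cons, hx1, show decide ((1:Nat) < 2) = true from rfl, if_true,
          List.foldl_cons, pvStep, hm, show (if (1:Nat) < 1 then some x else some m) = some m from rfl,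
          pvExactScan, hx]
        simpa using ih
      · have hx2 : pvRankB a1 a2 a3 x = 2 := by rw [hr]; simp [hx, hw]
        simp only [List.filter_cons, hx2, show decide ((2:Nat) < 2) = false from rfl,
          Bool.false_eq_true, if_false, pvExactScan, hx]
        simpa using ih

-- main characterisation: B's filter+min equals A's exact-then-wildcard scans
theorem minFilter_eq_scans (a1 a2 a3 : String) (l : List ((String × String × String) × String × List String)) :
    PySem.List.min? (l.filter (fun e => pvRankB a1 a2 a3 e < 2)) (pvRankB a1 a2 a3) =
      match pvExactScan a1 a2 a3 l with
      | some e => some e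
      | none => pvWildScan a1 a2 a3 l := by
  rw [min?_eq_foldl_step]
  induction l with
  | nil => rfl
  | cons x l ih =>
    have hr := rankB_eq a1 a2 a3 x
    by_cases hx : pvExact a1 a2 a3 x
    · have hx0 : pvRankB a1 a2 a3 x = 0 := by rw [hr]; simp [hx]
      simp only [List.filter_cons, hx0, show decide ((0:Nat) < 2) = true from rfl, if_true,
        List.foldl_cons, pvStep, pvExactScan, hx]
      exact minStep_fixed a1 a2 a3 x hx0 _
    · by_cases hw : pvWild a1 a2 a3 x
      · have hx1 : pvRankB a1 a2 a3 x = 1 := by rw [hr]; simp [hx, hw]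
        simp only [List.filter_cons, hx1, show decide ((1:Nat) < 2) = true from rfl, if_true,
          List.foldl_cons, pvStep, pvExactScan, hx, pvWildScan, hw]
        simpa using minStep_wild a1 a2 a3 x hx1 l
      · have hx2 : pvRankB a1 a2 a3 x = 2 := by rw [hr]; simp [hx, hw]
        simp only [List.filter_cons, hx2, show decide ((2:Nat) < 2) = false from rfl,
          Bool.false_eq_true, if_false, pvExactScan, hx, pvWildScan, hw]
        simpa using ih

-- ===== VERDICT (by name: the statement is the Claim_ definition above) =====
theorem match_angle_to_angle_type_spec : Claim_equal_match_angle_to_angle_type := by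
  intro aa ats angl _ _
  unfold Spec_match_angle_to_angle_type match_angle_to_angle_type match_angle_to_angle_type_alt
  match aa with
  | [] => rfl
  | [x] => cases h : pvLookup ats x <;> simp only [List.map, h] <;> rfl
  | [x, y] =>
    cases h1 : pvLookup ats x <;> cases h2 : pvLookup ats y <;> simp only [List.map, h1, h2] <;> rfl
  | x :: y :: z :: w :: t =>
    cases h1 : pvLookup ats x <;> cases h2 : pvLookup ats y <;> cases h3 : pvLookup ats z <;>
      simp only [List.map, h1, h2, h3] <;> rfl
  | [x, y, z] =>
    cases h1 : pvLookup ats x <;> cases h2 : pvLookup ats y <;> cases h3 : pvLookup ats z <;>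
      simp only [List.map, h1, h2, h3, List.length_cons, List.length_nil, List.getElem?_cons_zero,
        List.getElem?_cons_succ, lookup_eq_find, Option.bind, beq_self_eq_true,
        if_true] <;> try rfl
    simp only [minFilter_eq_scans]
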